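-- pv_equiv track=rewrite | github.com/Michelbaartman/jaar2TI | Algorithms and Datastructures/week1opdracht4.py | classCompare
-- ===== SOURCE A (Python) =====
-- def classCompare(lst, perBool):
--     """
--     classesGenerator(i : int, perBool : bool)
--         compares a list of lists of numbers and returns the amount of repeating numbers
--         contained in each list. if perBool is set to true, returns a percentage instead of amount
--
--     doublesCheck : int
--         starts at 0, counts upward based on how many repeating numbers in the given lists.
--     pos1 : int
--         position of the first interval
--     pos2 : int
--         position of the second interval
--     students : int
--         amount of students in total in all classrooms
--
--     return : int
--         returns doublesChecck
--     """
--     doublesCheck = 0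
--     pos1 = 0
--     pos2 = 1
--     students = 0
--     for group in lst:
--         for member in group:
--             students += 1
--
--     for list in lst:
--         while pos1 < len(list): ## maak er een set van en vergelijk de set met aantal studenten
--             while pos2 < len(list):
--                 if list[pos1] == list[pos2]:
--                     doublesCheck += 1
--                 pos2 += 1
--             pos1 += 1
--             pos2 = pos1+1
--         pos1 = 0
--         pos2 = 1
--
--     if not perBool:
--         return doublesCheck
--     if perBool:
--         return int(doublesCheck / students * 100)
-- ===== SOURCE B (Python) =====
-- def classCompare(lst, perBool):
--     # Sort each sublist once and count equal pairs by run lengths: sum run*(run-1)//2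
--     # (replaces A's quadratic all-pairs scan). Raises ZeroDivisionError, like A, when
--     # perBool is true and there are no students.
--     doublesCheck = 0
--     students = 0
--     for group in lst:
--         students += len(group)
--         prev = None
--         run = 0
--         for v in sorted(group):
--             if prev is not None and v == prev:
--                 run += 1
--             else:
--                 doublesCheck += run * (run - 1) // 2
--                 run = 1
--             prev = v
--         doublesCheck += run * (run - 1) // 2
--     if not perBool:
--         return doublesCheck
--     return int(doublesCheck / students * 100)
-- ===== Notes on version B (the rewrite author's own statement) =====
-- stated objective: faster
-- what changed: Replaces the quadratic all-pairs index scan inside each sublist by sorting the sublist once and summing run*(run-1)//2 over maximal runs of equal values in one linear pass.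
import Mathlib
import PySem

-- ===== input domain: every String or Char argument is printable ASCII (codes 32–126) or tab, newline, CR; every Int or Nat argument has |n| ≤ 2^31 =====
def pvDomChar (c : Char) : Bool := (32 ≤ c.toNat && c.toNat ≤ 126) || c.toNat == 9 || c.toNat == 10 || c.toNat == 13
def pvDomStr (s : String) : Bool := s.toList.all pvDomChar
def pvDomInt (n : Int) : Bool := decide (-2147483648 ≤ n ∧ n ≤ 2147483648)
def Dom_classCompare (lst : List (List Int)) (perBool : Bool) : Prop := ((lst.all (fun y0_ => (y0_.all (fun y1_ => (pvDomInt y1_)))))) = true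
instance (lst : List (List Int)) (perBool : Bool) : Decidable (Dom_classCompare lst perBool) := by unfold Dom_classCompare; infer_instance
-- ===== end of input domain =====

-- ===== PORT A =====
-- B changes the pair counting: sort each sublist once and sum run*(run-1)//2 over runs
-- of equal values, instead of A's quadratic all-pairs index scan (objective: faster).
--
-- Shared helper for the one expression both Pythons contain verbatim, `int(d / s * 100)`:
-- a hand-written model of CPython's float path, exact on this task's domain (0 <= d,
-- 0 < s, both far inside 2^53 scaling range): `pvRnd a b` is the IEEE-754 double nearest
-- to a/b (round half to even) as an exact rational, applied twice (d/s, then *100),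
-- then truncated. PySem has no float primitive, so this is ported by hand.
def pvRoundHalfEven (num den : Int) : Int :=
  let q := Int.ediv num den
  let r := num - q * den
  if den < 2 * r then q + 1
  else if 2 * r < den then q
  else if Int.emod q 2 = 0 then q else q + 1

def pvRnd (a b : Int) : Int × Int :=
  if a ≤ 0 then (0, 1)
  else
    let e0 : Int := (PySem.Int.bitLength a : Int) - (PySem.Int.bitLength b : Int)
    let e : Int := if b * 2 ^ e0.toNat ≤ a ∧ 0 ≤ e0 ∨ b ≤ a * 2 ^ (-e0).toNat ∧ e0 < 0 then e0 else e0 - 1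
    let sh : Int := 52 - e
    let num : Int := if 0 ≤ sh then a * 2 ^ sh.toNat else a
    let den : Int := if 0 ≤ sh then b else b * 2 ^ (-sh).toNat
    let q := pvRoundHalfEven num den
    if 52 ≤ e then (q * 2 ^ (e - 52).toNat, 1) else (q, 2 ^ (52 - e).toNat)

-- int(d / s * 100); the s = 0 branch is unreachable under Pre_ (Python raises there).
def pvPercent (d s : Int) : Int :=
  if s = 0 then 0
  else
    let p1 := pvRnd d s
    let p2 := pvRnd (p1.1 * 100) p1.2
    Int.ediv p2.1 p2.2

-- inner `while pos2 < len(list)`; list[pos1]/list[pos2] are always in range when called.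
def pvInnerA (l : List Int) (pos1 pos2 : Nat) (acc : Int) : Int :=
  if h : pos2 < l.length then
    pvInnerA l pos1 (pos2 + 1) (if l.getD pos1 0 = l.getD pos2 0 then acc + 1 else acc)
  else acc
termination_by l.length - pos2

-- outer `while pos1 < len(list)` (pos2 is reset to pos1+1 each iteration)
def pvOuterA (l : List Int) (pos1 : Nat) (acc : Int) : Int :=
  if h : pos1 < l.length then pvOuterA l (pos1 + 1) (pvInnerA l pos1 (pos1 + 1) acc)
  else acc
termination_by l.length - pos1

def classCompare (lst : List (List Int)) (perBool : Bool) : Int :=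
  let students := lst.foldl (fun s group => group.foldl (fun s _ => s + 1) s) (0 : Int)
  let doublesCheck := lst.foldl (fun acc l => pvOuterA l 0 acc) (0 : Int)
  if !perBool then doublesCheck else pvPercent doublesCheck students

-- ===== PORT B =====
-- one step of B's run-length scan over the sorted sublist; state = (doublesCheck, prev, run)
def pvStepB (st : Int × Option Int × Int) (v : Int) : Int × Option Int × Int :=
  if st.2.1 = some v then (st.1, some v, st.2.2 + 1)
  else (st.1 + PySem.Int.floordiv (st.2.2 * (st.2.2 - 1)) 2, some v, 1)

-- body of `for group in lst`, the doublesCheck part: sort, scan runs, flush the last run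
def pvGroupB (acc : Int) (group : List Int) : Int :=
  let st := (PySem.List.sorted group (fun x => x) false).foldl pvStepB (acc, none, 0)
  st.1 + PySem.Int.floordiv (st.2.2 * (st.2.2 - 1)) 2

def classCompare_alt (lst : List (List Int)) (perBool : Bool) : Int :=
  let p := lst.foldl (fun p group => (pvGroupB p.1 group, p.2 + (group.length : Int))) ((0 : Int), (0 : Int))
  if !perBool then p.1 else pvPercent p.1 p.2

-- ===== PRECONDITION & SPEC =====
-- Pre_ excludes exactly the inputs where Python A raises ZeroDivisionError:
-- perBool true with zero students (all sublists empty). B raises there too.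
def Pre_classCompare (lst : List (List Int)) (perBool : Bool) : Prop :=
  perBool = true → lst.flatten ≠ []
instance (lst : List (List Int)) (perBool : Bool) : Decidable (Pre_classCompare lst perBool) := by
  unfold Pre_classCompare; infer_instance

def pvWitness_classCompare : List (List Int) × Bool := ([[1, 1, 2], [3]], true)

def Spec_classCompare (lst : List (List Int)) (perBool : Bool) (out : Int) : Prop := out = classCompare_alt lst perBool
instance (lst : List (List Int)) (perBool : Bool) (out : Int) : Decidable (Spec_classCompare lst perBool out) := by unfold Spec_classCompare; infer_instance

-- ===== CLAIM (what is proved, stated in full; the proofs are below) =====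
def Claim_equal_classCompare : Prop := ∀ (lst : List (List Int)) (perBool : Bool), Dom_classCompare lst perBool → Pre_classCompare lst perBool → Spec_classCompare lst perBool (classCompare lst perBool)

-- ===== LEMMAS AND PROOFS =====

-- the pair count both programs compute, in A's traversal order:
-- for each position, occurrences of that element later in the list
def pvPC : List Int → Int
  | [] => 0
  | x :: xs => (xs.count x : Int) + pvPC xs

theorem pvPC_perm {l1 l2 : List Int} (h : l1.Perm l2) : pvPC l1 = pvPC l2 := by
  induction h with
  | nil => rfl
  | cons x h ih => simp [pvPC, h.count_eq, ih]
  | swap x y l =>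
      simp only [pvPC, List.count_cons, beq_iff_eq]
      by_cases hxy : x = y
      · subst hxy
        ring
      · rw [if_neg hxy, if_neg (Ne.symm hxy)]
        push_cast
        ring
  | trans _ _ ih1 ih2 => exact ih1.trans ih2

theorem pvInnerA_eq (l : List Int) (pos1 : Nat) :
    ∀ pos2 acc, pvInnerA l pos1 pos2 acc = acc + ((l.drop pos2).count (l.getD pos1 0) : Int) := by
  intro pos2
  induction hn : l.length - pos2 generalizing pos2 with
  | zero =>
      intro acc
      rw [pvInnerA]
      have h2 : ¬ pos2 < l.length := by omega
      have hd : List.drop pos2 l = [] := List.drop_eq_nil_of_le (by omega)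
      simp [h2, hd]
  | succ n ih =>
      intro acc
      have h2 : pos2 < l.length := by omega
      rw [pvInnerA]
      simp only [h2, dif_pos]
      rw [ih (pos2 + 1) (by omega)]
      have hgd : l.getD pos2 0 = l[pos2] := List.getD_eq_getElem l 0 h2
      rw [List.drop_eq_getElem_cons h2, List.count_cons, ← hgd]
      simp only [beq_iff_eq]
      by_cases he : l.getD pos1 0 = l.getD pos2 0
      · rw [if_pos he, if_pos he.symm]
        push_cast
        ring
      · rw [if_neg he, if_neg (fun h => he h.symm)]
        push_cast
        ring

theorem pvOuterA_eq (l : List Int) :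
    ∀ pos1 acc, pvOuterA l pos1 acc = acc + pvPC (l.drop pos1) := by
  intro pos1
  induction hn : l.length - pos1 generalizing pos1 with
  | zero =>
      intro acc
      rw [pvOuterA]
      have h1 : ¬ pos1 < l.length := by omega
      have hd : List.drop pos1 l = [] := List.drop_eq_nil_of_le (by omega)
      simp [h1, hd, pvPC]
  | succ n ih =>
      intro acc
      have h1 : pos1 < l.length := by omega
      rw [pvOuterA]
      simp only [h1, dif_pos]
      rw [ih (pos1 + 1) (by omega), pvInnerA_eq]
      rw [List.drop_eq_getElem_cons h1]
      simp only [pvPC, List.getD_eq_getElem l 0 h1]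
      push_cast
      ring

def pvTri (r : Int) : Int := PySem.Int.floordiv (r * (r - 1)) 2

theorem pvTri_cast_succ (k : Nat) : pvTri ((k : Int) + 1) = (k : Int) + pvTri (k : Int) := by
  unfold pvTri
  rw [PySem.Int.floordiv_eq_ediv_of_pos (by norm_num), PySem.Int.floordiv_eq_ediv_of_pos (by norm_num)]
  have h1 : ((k : Int) + 1) * ((k : Int) + 1 - 1) = (k : Int) * ((k : Int) - 1) + 2 * (k : Int) := by ring
  rw [h1, Int.add_mul_ediv_left _ _ (by norm_num : (2:Int) ≠ 0)]
  ring

theorem pvPC_replicate (k : Nat) (p : Int) : pvPC (List.replicate k p) = pvTri (k : Int) := by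
  induction k with
  | zero =>
      simp only [List.replicate_zero, pvPC]
      decide
  | succ n ih =>
      rw [List.replicate_succ]
      simp only [pvPC, List.count_replicate_self, ih]
      rw [show ((n + 1 : Nat) : Int) = (n : Int) + 1 by push_cast; ring, pvTri_cast_succ]

theorem pvPC_replicate_append (k : Nat) (p : Int) (l : List Int) (h : p ∉ l) :
    pvPC (List.replicate k p ++ l) = pvTri (k : Int) + pvPC l := by
  induction k with
  | zero =>
      rw [List.replicate_zero, List.nil_append,
        show pvTri ((0 : Nat) : Int) = 0 from by decide, zero_add]
  | succ n ih =>
      rw [List.replicate_succ, List.cons_append]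
      simp only [pvPC, ih]
      rw [List.count_append, List.count_replicate, List.count_eq_zero_of_not_mem h]
      simp
      rw [pvTri_cast_succ]
      push_cast
      ring

theorem pvPC_replicate_cons (k : Nat) (p : Int) (l : List Int) :
    pvPC (List.replicate k p ++ p :: l) = pvPC (List.replicate (k + 1) p ++ l) := by
  apply pvPC_perm
  rw [List.replicate_succ]
  exact List.perm_middle

theorem pvScan_inv (l : List Int) :
    ∀ (acc p : Int) (r : Nat), 1 ≤ r → l.Pairwise (· ≤ ·) → (∀ x ∈ l, p ≤ x) →
      (l.foldl pvStepB (acc, some p, (r : Int))).1 + pvTri (l.foldl pvStepB (acc, some p, (r : Int))).2.2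
        = acc + pvPC (List.replicate r p ++ l) := by
  induction l with
  | nil =>
      intro acc p r hr _ _
      simp only [List.foldl]
      rw [List.append_nil, pvPC_replicate]
  | cons x xs ih =>
      intro acc p r hr hpw hge
      have hx : p ≤ x := hge x (by simp)
      have htail : ∀ y ∈ xs, x ≤ y := by
        intro y hy
        rcases hpw with _ | ⟨hall, _⟩
        exact hall y hy
      by_cases hpx : p = x
      · subst hpx
        have hstep : pvStepB (acc, some p, (r : Int)) p = (acc, some p, ((r + 1 : Nat) : Int)) := by
          simp [pvStepB]
        simp only [List.foldl]
        rw [hstep, ih acc p (r + 1) (by omega) hpw.of_cons htail, pvPC_replicate_cons]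
      · have hstep : pvStepB (acc, some p, (r : Int)) x = (acc + pvTri (r : Int), some x, ((1 : Nat) : Int)) := by
          simp [pvStepB, pvTri, hpx]
        have hnotin : p ∉ x :: xs := by
          intro hmem
          rcases List.mem_cons.mp hmem with h | h
          · exact hpx h
          · exact hpx (le_antisymm hx (htail p h))
        simp only [List.foldl]
        rw [hstep, ih (acc + pvTri (r : Int)) x 1 (le_refl 1) hpw.of_cons (fun y hy => htail y hy)]
        rw [pvPC_replicate_append r p (x :: xs) hnotin]
        rw [show List.replicate 1 x ++ xs = x :: xs by simp]
        ring

theorem pvGroupB_eq (acc : Int) (g : List Int) : pvGroupB acc g = acc + pvPC g := by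
  unfold pvGroupB
  have hz : PySem.Int.floordiv (0 : Int) 2 = 0 := by decide
  have hTri : ∀ z : Int, PySem.Int.floordiv (z * (z - 1)) 2 = pvTri z := fun _ => rfl
  have hperm : (PySem.List.sorted g (fun x => x) false).Perm g := PySem.List.sorted_perm g _ _
  have hpw : (PySem.List.sorted g (fun x => x) false).Pairwise (· ≤ ·) := by
    have := PySem.List.sorted_pairwise g (fun x => x)
    simpa using this
  rw [← pvPC_perm hperm]
  cases hs : PySem.List.sorted g (fun x => x) false with
  | nil =>
      simp only [List.foldl, pvPC]
      simp
  | cons x t =>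
      rw [hs] at hpw
      have htail : ∀ y ∈ t, x ≤ y := by
        intro y hy
        rcases hpw with _ | ⟨hall, _⟩
        exact hall y hy
      have hstep : pvStepB (acc, none, 0) x = (acc, some x, ((1 : Nat) : Int)) := by
        simp [pvStepB]
      simp only [List.foldl]
      rw [hstep, hTri, pvScan_inv t acc x 1 (le_refl 1) hpw.of_cons htail]
      rw [show List.replicate 1 x ++ t = x :: t by simp]

theorem pvLen_fold (g : List Int) : ∀ acc : Int, g.foldl (fun s _ => s + 1) acc = acc + g.length := by
  induction g with
  | nil => intro acc; simp
  | cons y t ih =>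
      intro acc
      simp only [List.foldl, List.length_cons, ih]
      push_cast
      ring

theorem pvStudents_eq (lst : List (List Int)) :
    lst.foldl (fun s group => group.foldl (fun s _ => s + 1) s) (0 : Int)
      = lst.foldl (fun s group => s + (group.length : Int)) (0 : Int) := by
  apply PySem.List.foldl_congr_mem
  intro acc g _
  rw [pvLen_fold]

theorem pvDoubles_eq (lst : List (List Int)) :
    lst.foldl (fun acc l => pvOuterA l 0 acc) (0 : Int)
      = lst.foldl (fun acc group => pvGroupB acc group) (0 : Int) := by
  apply PySem.List.foldl_congr_mem
  intro acc g _
  rw [pvOuterA_eq g 0 acc, pvGroupB_eq]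
  simp

-- ===== VERDICT (by name: the statement is the Claim_ definition above) =====
theorem classCompare_spec : Claim_equal_classCompare := by
  intro lst perBool _ _
  unfold Spec_classCompare classCompare classCompare_alt
  rw [PySem.List.foldl_prod_mk (f := fun acc group => pvGroupB acc group)
        (g := fun s group => s + (group.length : Int))]
  rw [pvStudents_eq, pvDoubles_eq]
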